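-- pv_equiv track=rewrite | github.com/LinkedEarth/paleopal | backend/agents/code/handlers.py | _find_matching_signatures
-- ===== SOURCE A (Python) =====
-- from typing import Dict, Any, List, Optional
--
-- def _find_matching_signatures(requested_symbols: List[str], symbol_index: Dict[str, str]) -> str:
--     """
--     Find the full signatures for the requested symbols.
--     """
--     found_signatures = []
--     not_found = []
--     added_signatures = set()  # Track what we've already added to avoid duplicates
--
--     for symbol in requested_symbols:
--         found = False
--
--         # Try exact match first
--         if symbol in symbol_index:
--             sig = symbol_index[symbol]
--             if sig not in added_signatures:
--                 found_signatures.append(sig)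
--                 added_signatures.add(sig)
--             found = True
--         else:
--             # Try partial matching with priority order
--             matches = []
--
--             # 1. Look for exact suffix matches (e.g., "plot" matches "SomeClass.plot")
--             for key in symbol_index.keys():
--                 if key.lower().endswith('.' + symbol.lower()):
--                     matches.append((key, 1))  # Priority 1 (highest)
--
--             # 2. Look for substring matches in method names
--             if not matches:
--                 symbol_parts = symbol.split('.')
--                 target_method = symbol_parts[-1] if len(symbol_parts) > 1 else symbol
--
--                 for key in symbol_index.keys():
--                     key_parts = key.split('.')
--                     if len(key_parts) > 1 and target_method.lower() == key_parts[-1].lower():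
--                         matches.append((key, 2))  # Priority 2
--
--             # 3. Look for general substring matches
--             if not matches:
--                 for key in symbol_index.keys():
--                     if symbol.lower() in key.lower():
--                         matches.append((key, 3))  # Priority 3 (lowest)
--
--             if matches:
--                 # Sort by priority and take the best match
--                 matches.sort(key=lambda x: x[1])
--                 best_match = matches[0][0]
--                 sig = symbol_index[best_match]
--                 if sig not in added_signatures:
--                     found_signatures.append(sig)
--                     added_signatures.add(sig)
--                 found = True
--
--         if not found:
--             not_found.append(symbol)
--
--     result = []
--     if found_signatures:
--         result.append("# REQUESTED FUNCTION/CLASS SIGNATURES:")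
--         # Remove duplicates while preserving order
--         unique_signatures = []
--         for sig in found_signatures:
--             if sig not in unique_signatures:
--                 unique_signatures.append(sig)
--         result.extend(unique_signatures)
--         result.append("")
--
--     if not_found:
--         result.append(f"# NOTE: Could not find signatures for: {', '.join(not_found)}")
--         result.append("")
--
--     return '\n'.join(result)
-- ===== SOURCE B (Python) =====
-- from typing import Dict, List
--
-- def _find_matching_signatures(requested_symbols: List[str], symbol_index: Dict[str, str]) -> str:
--     """Single-pass matcher: each key gets the lowest priority it satisfies (1 exact
--     suffix, 2 same last component, 3 substring); one running best replaces the three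
--     sequential scans + sort, and the already-deduplicated list is emitted directly."""
--     found = []
--     missing = []
--     added = set()
--
--     for symbol in requested_symbols:
--         if symbol in symbol_index:
--             best = symbol
--         else:
--             sl = symbol.lower()
--             parts = symbol.split('.')
--             target = (parts[-1] if len(parts) > 1 else symbol).lower()
--             best, best_p = None, 4
--             for key in symbol_index:
--                 kl = key.lower()
--                 if kl.endswith('.' + sl):
--                     p = 1
--                 else:
--                     kp = key.split('.')
--                     if len(kp) > 1 and target == kp[-1].lower():
--                         p = 2
--                     elif sl in kl:
--                         p = 3
--                     else:
--                         continue
--                 if p < best_p: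
--                     best, best_p = key, p
--             if best is None:
--                 missing.append(symbol)
--                 continue
--         sig = symbol_index[best]
--         if sig not in added:
--             found.append(sig)
--             added.add(sig)
--
--     lines = []
--     if found:
--         lines.append("# REQUESTED FUNCTION/CLASS SIGNATURES:")
--         lines.extend(found)
--         lines.append("")
--     if missing:
--         lines.append("# NOTE: Could not find signatures for: " + ", ".join(missing))
--         lines.append("")
--     return '\n'.join(lines)
-- ===== Notes on version B (the rewrite author's own statement) =====
-- stated objective: alternative
-- what changed: The three sequential priority scans plus a stability sort are replaced by one pass over the keys that assigns each key the lowest priority it satisfies and keeps a single running best (strict-improvement update preserves the first-key tie-break), and the redundant second deduplication pass over the already set-deduplicated signature list is dropped.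
import Mathlib
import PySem

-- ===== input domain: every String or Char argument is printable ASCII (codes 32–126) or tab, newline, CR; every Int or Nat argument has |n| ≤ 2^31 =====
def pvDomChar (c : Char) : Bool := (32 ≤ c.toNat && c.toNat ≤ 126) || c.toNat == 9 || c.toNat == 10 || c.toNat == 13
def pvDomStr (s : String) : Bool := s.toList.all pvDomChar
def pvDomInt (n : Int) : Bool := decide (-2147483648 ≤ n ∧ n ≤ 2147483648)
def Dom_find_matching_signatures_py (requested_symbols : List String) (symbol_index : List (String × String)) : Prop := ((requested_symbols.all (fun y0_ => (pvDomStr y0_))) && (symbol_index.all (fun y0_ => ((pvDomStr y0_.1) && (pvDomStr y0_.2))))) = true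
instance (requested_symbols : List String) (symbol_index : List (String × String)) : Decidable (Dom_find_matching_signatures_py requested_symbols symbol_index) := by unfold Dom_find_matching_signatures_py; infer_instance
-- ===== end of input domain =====

-- B replaces A's three sequential priority scans + sort with a single best-candidate pass
-- over the keys, and drops A's redundant second deduplication pass (objective: alternative).

-- ===== PORT A =====
-- priority-1 scan: key.lower().endswith('.' + symbol.lower())
def pvA_matches1 (keys : List String) (symbol : String) : List (String × Int) :=
  keys.foldl (fun acc key =>
    if PySem.Chars.endswith (PySem.Chars.lower key.toList) ('.' :: PySem.Chars.lower symbol.toList)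
    then acc ++ [(key, 1)] else acc) []

-- priority-2 scan: len(key_parts) > 1 and target_method.lower() == key_parts[-1].lower()
def pvA_matches2 (keys : List String) (symbol : String) : List (String × Int) :=
  let symbol_parts := PySem.Chars.splitOn symbol.toList ['.']
  let target_method := if symbol_parts.length > 1 then symbol_parts.getLastD [] else symbol.toList
  keys.foldl (fun acc key =>
    let key_parts := PySem.Chars.splitOn key.toList ['.']
    if key_parts.length > 1 && (PySem.Chars.lower target_method == PySem.Chars.lower (key_parts.getLastD []))
    then acc ++ [(key, 2)] else acc) []

-- priority-3 scan: symbol.lower() in key.lower()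
def pvA_matches3 (keys : List String) (symbol : String) : List (String × Int) :=
  keys.foldl (fun acc key =>
    if PySem.Chars.isIn (PySem.Chars.lower symbol.toList) (PySem.Chars.lower key.toList)
    then acc ++ [(key, 3)] else acc) []

-- per-symbol selection: exact match, else the three scans, sort by priority, take the head.
-- (best_match is always one of the dict's keys, so the symbol_index[best_match] lookup
-- cannot raise; getD with "" is exact on every reachable input)
def pvA_sel (d : PySem.Dict String String) (symbol : String) : Option String :=
  match d.get? symbol with
  | some sig => some sig
  | none =>
    let matchesL := pvA_matches1 d.keys symbol
    let matchesL := if matchesL.isEmpty then pvA_matches2 d.keys symbol else matchesL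
    let matchesL := if matchesL.isEmpty then pvA_matches3 d.keys symbol else matchesL
    match PySem.List.sorted matchesL (fun x => x.2) false with
    | [] => none
    | (best_match, _) :: _ => some (d.getD best_match "")

-- loop body over (found_signatures, not_found, added_signatures)
def pvA_step (d : PySem.Dict String String) (st : List String × List String × PySem.Set String)
    (symbol : String) : List String × List String × PySem.Set String :=
  match pvA_sel d symbol with
  | some sig =>
      if PySem.Set.contains st.2.2 sig then st
      else (st.1 ++ [sig], st.2.1, PySem.Set.add st.2.2 sig)
  | none => (st.1, st.2.1 ++ [symbol], st.2.2)

def find_matching_signatures_py (requested_symbols : List String) (symbol_index : List (String × String)) : String :=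
  let d := PySem.Dict.ofList symbol_index
  let st := requested_symbols.foldl (pvA_step d) ([], [], PySem.Set.empty)
  let found_signatures := st.1
  let not_found := st.2.1
  -- "remove duplicates while preserving order"
  let unique_signatures := found_signatures.foldl (fun u sig => if PySem.Set.contains u sig then u else u ++ [sig]) []
  let result : List String :=
    (if found_signatures.isEmpty then []
     else "# REQUESTED FUNCTION/CLASS SIGNATURES:" :: (unique_signatures ++ [""]))
    ++ (if not_found.isEmpty then []
        else [String.ofList ("# NOTE: Could not find signatures for: ".toList
                ++ PySem.Chars.join [',', ' '] (not_found.map String.toList)), ""])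
  PySem.Str.join "\n" result

-- ===== PORT B =====
-- lowest priority a key satisfies (none = no match)
def pvB_prio (sl target : List Char) (key : String) : Option Int :=
  let kl := PySem.Chars.lower key.toList
  if PySem.Chars.endswith kl ('.' :: sl) then some 1
  else
    let kp := PySem.Chars.splitOn key.toList ['.']
    if kp.length > 1 && (target == PySem.Chars.lower (kp.getLastD [])) then some 2
    else if PySem.Chars.isIn sl kl then some 3
    else none

-- single pass: keep the first key attaining the running minimum priority
def pvB_sel (d : PySem.Dict String String) (symbol : String) : Option String :=
  if d.contains symbol then some symbol
  else
    let sl := PySem.Chars.lower symbol.toList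
    let parts := PySem.Chars.splitOn symbol.toList ['.']
    let target := PySem.Chars.lower (if parts.length > 1 then parts.getLastD [] else symbol.toList)
    (d.keys.foldl (fun (st : Option String × Int) key =>
        match pvB_prio sl target key with
        | none => st
        | some p => if p < st.2 then (some key, p) else st) (none, 4)).1

def pvB_step (d : PySem.Dict String String) (st : List String × List String × PySem.Set String)
    (symbol : String) : List String × List String × PySem.Set String :=
  match pvB_sel d symbol with
  | some best =>
      let sig := d.getD best ""
      if PySem.Set.contains st.2.2 sig then st
      else (st.1 ++ [sig], st.2.1, PySem.Set.add st.2.2 sig)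
  | none => (st.1, st.2.1 ++ [symbol], st.2.2)

def find_matching_signatures_py_alt (requested_symbols : List String) (symbol_index : List (String × String)) : String :=
  let d := PySem.Dict.ofList symbol_index
  let st := requested_symbols.foldl (pvB_step d) ([], [], PySem.Set.empty)
  let found := st.1
  let missing := st.2.1
  let lines : List String :=
    (if found.isEmpty then [] else "# REQUESTED FUNCTION/CLASS SIGNATURES:" :: (found ++ [""]))
    ++ (if missing.isEmpty then []
        else [String.ofList ("# NOTE: Could not find signatures for: ".toList
                ++ PySem.Chars.join [',', ' '] (missing.map String.toList)), ""])
  PySem.Str.join "\n" lines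

-- ===== PRECONDITION & SPEC =====
def Spec_find_matching_signatures_py (requested_symbols : List String) (symbol_index : List (String × String)) (out : String) : Prop := out = find_matching_signatures_py_alt requested_symbols symbol_index
instance (requested_symbols : List String) (symbol_index : List (String × String)) (out : String) : Decidable (Spec_find_matching_signatures_py requested_symbols symbol_index out) := by unfold Spec_find_matching_signatures_py; infer_instance

-- ===== CLAIM (what is proved, stated in full; the proofs are below) =====
def Claim_equal_find_matching_signatures_py : Prop := ∀ (requested_symbols : List String) (symbol_index : List (String × String)), Dom_find_matching_signatures_py requested_symbols symbol_index → Spec_find_matching_signatures_py requested_symbols symbol_index (find_matching_signatures_py requested_symbols symbol_index)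

-- ===== LEMMAS AND PROOFS =====

-- proof-only helpers: the shared match predicates and B's fold step, named
def pvTgt (s : String) : List Char :=
  let parts := PySem.Chars.splitOn s.toList ['.']
  if parts.length > 1 then parts.getLastD [] else s.toList

def pvP1 (s k : String) : Bool :=
  PySem.Chars.endswith (PySem.Chars.lower k.toList) ('.' :: PySem.Chars.lower s.toList)

def pvP2 (s k : String) : Bool :=
  let kp := PySem.Chars.splitOn k.toList ['.']
  kp.length > 1 && (PySem.Chars.lower (pvTgt s) == PySem.Chars.lower (kp.getLastD []))

def pvP3 (s k : String) : Bool :=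
  PySem.Chars.isIn (PySem.Chars.lower s.toList) (PySem.Chars.lower k.toList)

def pvPrio (s : String) : String → Option Int :=
  fun k => pvB_prio (PySem.Chars.lower s.toList) (PySem.Chars.lower (pvTgt s)) k

def pvStep (prio : String → Option Int) (st : Option String × Int) (key : String) :
    Option String × Int :=
  match prio key with
  | none => st
  | some p => if p < st.2 then (some key, p) else st

theorem prio_eq (s k : String) :
    pvPrio s k = if pvP1 s k then some 1 else if pvP2 s k then some 2
      else if pvP3 s k then some 3 else none := by
  rfl

theorem m1_eq (keys : List String) (s : String) :
    pvA_matches1 keys s = (keys.filter (pvP1 s)).map (fun k => (k, (1 : Int))) := by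
  unfold pvA_matches1 pvP1
  rw [PySem.List.foldl_append_if, List.nil_append]

theorem m2_eq (keys : List String) (s : String) :
    pvA_matches2 keys s = (keys.filter (pvP2 s)).map (fun k => (k, (2 : Int))) := by
  unfold pvA_matches2 pvP2 pvTgt
  rw [PySem.List.foldl_append_if, List.nil_append]

theorem m3_eq (keys : List String) (s : String) :
    pvA_matches3 keys s = (keys.filter (pvP3 s)).map (fun k => (k, (3 : Int))) := by
  unfold pvA_matches3 pvP3
  rw [PySem.List.foldl_append_if, List.nil_append]

theorem prio_beq1 (s k : String) : (pvPrio s k == some 1) = pvP1 s k := by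
  rw [prio_eq]; by_cases h1 : pvP1 s k
  · simp [h1]
  · simp [h1]; split_ifs <;> simp

theorem prio_beq2 (s k : String) (h1 : pvP1 s k = false) :
    (pvPrio s k == some 2) = pvP2 s k := by
  rw [prio_eq, h1]; by_cases h2 : pvP2 s k <;> simp [h2]

theorem prio_beq3 (s k : String) (h1 : pvP1 s k = false) (h2 : pvP2 s k = false) :
    (pvPrio s k == some 3) = pvP3 s k := by
  rw [prio_eq, h1, h2]; by_cases h3 : pvP3 s k <;> simp [h3]

theorem prio_ge_one (s k : String) (q : Int) (h : pvPrio s k = some q) : 1 ≤ q := by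
  rw [prio_eq] at h; split_ifs at h <;> simp_all <;> omega

theorem prio_ge_two (s k : String) (q : Int) (h1 : pvP1 s k = false)
    (h : pvPrio s k = some q) : 2 ≤ q := by
  rw [prio_eq, h1] at h
  split_ifs at h <;> simp_all
  omega

theorem prio_ge_three (s k : String) (q : Int) (h1 : pvP1 s k = false) (h2 : pvP2 s k = false)
    (h : pvPrio s k = some q) : 3 ≤ q := by
  rw [prio_eq, h1, h2] at h; split_ifs at h <;> simp_all

theorem prio_none (s k : String) (h1 : pvP1 s k = false) (h2 : pvP2 s k = false)
    (h3 : pvP3 s k = false) : pvPrio s k = none := by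
  rw [prio_eq, h1, h2, h3]; rfl

theorem pvStep_stay (prio : String → Option Int) (ks : List String) (b : Option String) (p : Int)
    (h : ∀ k ∈ ks, ∀ q, prio k = some q → p ≤ q) :
    ks.foldl (pvStep prio) (b, p) = (b, p) := by
  induction ks with
  | nil => rfl
  | cons k ks ih =>
    have hstep : pvStep prio (b, p) k = (b, p) := by
      unfold pvStep
      cases hq : prio k with
      | none => rfl
      | some q => simp [not_lt.mpr (h k (by simp) q hq)]
    rw [List.foldl_cons, hstep]
    exact ih (fun k hk => h k (List.mem_cons_of_mem _ hk))

theorem pvStep_hit (prio : String → Option Int) (ks : List String) (b : Option String)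
    (p t : Int) (k0 : String) (hp : t < p)
    (hlb : ∀ k ∈ ks, ∀ q, prio k = some q → t ≤ q)
    (hfind : ks.find? (fun k => prio k == some t) = some k0) :
    ks.foldl (pvStep prio) (b, p) = (some k0, t) := by
  induction ks generalizing b p with
  | nil => simp at hfind
  | cons k ks ih =>
    rw [List.foldl_cons]
    by_cases hk : (prio k == some t) = true
    · rw [List.find?_cons_of_pos (p := fun k => prio k == some t) hk, Option.some_inj] at hfind
      have hk' : prio k = some t := by simpa using hk
      have hstep : pvStep prio (b, p) k = (some k, t) := by
        unfold pvStep; rw [hk']; simp [hp]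
      rw [hstep, ← hfind]
      exact pvStep_stay prio ks (some k) t (fun k hk q hq => hlb k (List.mem_cons_of_mem _ hk) q hq)
    · rw [List.find?_cons_of_neg (p := fun k => prio k == some t) hk] at hfind
      have hlb' : ∀ k ∈ ks, ∀ q, prio k = some q → t ≤ q :=
        fun k hk q hq => hlb k (List.mem_cons_of_mem _ hk) q hq
      cases hq : prio k with
      | none =>
        have hstep : pvStep prio (b, p) k = (b, p) := by unfold pvStep; rw [hq]
        rw [hstep]; exact ih b p hp hlb' hfind
      | some q =>
        have htq : t ≤ q := hlb k (by simp) q hq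
        have hne : q ≠ t := by intro h; apply hk; simp [hq, h]
        have htq' : t < q := lt_of_le_of_ne (by omega) (Ne.symm hne)
        by_cases hqp : q < p
        · have hstep : pvStep prio (b, p) k = (some k, q) := by unfold pvStep; rw [hq]; simp [hqp]
          rw [hstep]; exact ih (some k) q htq' hlb' hfind
        · have hstep : pvStep prio (b, p) k = (b, p) := by unfold pvStep; rw [hq]; simp [hqp]
          rw [hstep]; exact ih b p hp hlb' hfind

theorem find_first (keys : List String) (pb pf : String → Bool)
    (h : ∀ k ∈ keys, pb k = pf k) (k0 : String) (tl : List (String))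
    (hf : keys.filter pf = k0 :: tl) :
    keys.find? pb = some k0 := by
  rw [← List.head?_filter, List.filter_congr h, hf]; rfl

theorem sel_eq (d : PySem.Dict String String) (s : String) :
    pvA_sel d s = (pvB_sel d s).map (fun k => d.getD k "") := by
  cases hc : d.get? s with
  | some sig =>
    have hcont : d.contains s = true := by rw [PySem.Dict.contains_eq_isSome_get?, hc]; rfl
    simp [pvA_sel, pvB_sel, hc, hcont, PySem.Dict.getD_of_get?_eq_some d "" hc]
  | none =>
    have hcont : d.contains s = false := by rw [PySem.Dict.contains_eq_isSome_get?, hc]; rfl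
    simp only [pvA_sel, pvB_sel, hc, hcont, Bool.false_eq_true, if_false]
    rw [m1_eq, m2_eq, m3_eq]
    have hfold : (fun (st : Option String × Int) key =>
        match pvB_prio (PySem.Chars.lower s.toList)
          (PySem.Chars.lower
            (if (PySem.Chars.splitOn s.toList ['.']).length > 1
             then (PySem.Chars.splitOn s.toList ['.']).getLastD [] else s.toList)) key with
        | none => st
        | some p => if p < st.2 then (some key, p) else st) = pvStep (pvPrio s) := rfl
    rw [hfold]
    cases hf1 : d.keys.filter (pvP1 s) with
    | cons k0 tl =>
      have hA : PySem.List.sorted ((k0, (1 : Int)) :: tl.map (fun k => (k, (1 : Int))))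
          (fun x => x.2) false = (k0, 1) :: tl.map (fun k => (k, (1 : Int))) := by
        refine PySem.List.sorted_eq_self_of_pairwise _ _ (List.Pairwise.cons ?_
          (List.pairwise_map.2 (List.pairwise_of_forall_sublist (fun _ => le_refl _))))
        intro b hb
        obtain ⟨x, -, rfl⟩ := List.mem_map.mp hb
        exact le_refl _
      have hB := pvStep_hit (pvPrio s) d.keys none 4 1 k0 (by omega)
        (fun k _ q hq => prio_ge_one s k q hq)
        (find_first d.keys _ (pvP1 s) (fun k _ => prio_beq1 s k) k0 tl hf1)
      simp [hA, hB]
    | nil =>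
      have hno1 : ∀ k ∈ d.keys, pvP1 s k = false := by
        intro k hk
        simpa using (List.filter_eq_nil_iff.mp hf1 k hk)
      cases hf2 : d.keys.filter (pvP2 s) with
      | cons k0 tl =>
        have hA : PySem.List.sorted ((k0, (2 : Int)) :: tl.map (fun k => (k, (2 : Int))))
            (fun x => x.2) false = (k0, 2) :: tl.map (fun k => (k, (2 : Int))) := by
          refine PySem.List.sorted_eq_self_of_pairwise _ _ (List.Pairwise.cons ?_
            (List.pairwise_map.2 (List.pairwise_of_forall_sublist (fun _ => le_refl _))))
          intro b hb
          obtain ⟨x, -, rfl⟩ := List.mem_map.mp hb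
          exact le_refl _
        have hB := pvStep_hit (pvPrio s) d.keys none 4 2 k0 (by omega)
          (fun k hk q hq => prio_ge_two s k q (hno1 k hk) hq)
          (find_first d.keys _ (pvP2 s) (fun k hk => prio_beq2 s k (hno1 k hk)) k0 tl hf2)
        simp [hA, hB]
      | nil =>
        have hno2 : ∀ k ∈ d.keys, pvP2 s k = false := by
          intro k hk
          simpa using (List.filter_eq_nil_iff.mp hf2 k hk)
        cases hf3 : d.keys.filter (pvP3 s) with
        | cons k0 tl =>
          have hA : PySem.List.sorted ((k0, (3 : Int)) :: tl.map (fun k => (k, (3 : Int))))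
              (fun x => x.2) false = (k0, 3) :: tl.map (fun k => (k, (3 : Int))) := by
            refine PySem.List.sorted_eq_self_of_pairwise _ _ (List.Pairwise.cons ?_
              (List.pairwise_map.2 (List.pairwise_of_forall_sublist (fun _ => le_refl _))))
            intro b hb
            obtain ⟨x, -, rfl⟩ := List.mem_map.mp hb
            exact le_refl _
          have hB := pvStep_hit (pvPrio s) d.keys none 4 3 k0 (by omega)
            (fun k hk q hq => prio_ge_three s k q (hno1 k hk) (hno2 k hk) hq)
            (find_first d.keys _ (pvP3 s)
              (fun k hk => prio_beq3 s k (hno1 k hk) (hno2 k hk)) k0 tl hf3)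
          simp [hA, hB]
        | nil =>
          have hno3 : ∀ k ∈ d.keys, pvP3 s k = false := by
            intro k hk
            simpa using (List.filter_eq_nil_iff.mp hf3 k hk)
          have hB := pvStep_stay (pvPrio s) d.keys none 4
            (fun k hk q hq => by rw [prio_none s k (hno1 k hk) (hno2 k hk) (hno3 k hk)] at hq; cases hq)
          simp [hB]
          rfl

theorem step_eq (d : PySem.Dict String String) : pvA_step d = pvB_step d := by
  funext st s
  unfold pvA_step pvB_step
  rw [sel_eq]
  cases pvB_sel d s <;> simp

-- in A (and B) found_signatures stays equal to the added_signatures set, hence Nodup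
theorem pvB_inv (d : PySem.Dict String String) (l : List String) :
    ∀ st : List String × List String × PySem.Set String, st.1 = st.2.2 → st.1.Nodup →
      (l.foldl (pvB_step d) st).1 = (l.foldl (pvB_step d) st).2.2
        ∧ (l.foldl (pvB_step d) st).1.Nodup := by
  induction l with
  | nil => exact fun st h hn => ⟨h, hn⟩
  | cons s l ih =>
    intro st h hn
    rw [List.foldl_cons]
    have hstep : (pvB_step d st s).1 = (pvB_step d st s).2.2 ∧ (pvB_step d st s).1.Nodup := by
      unfold pvB_step
      cases pvB_sel d s with
      | none => exact ⟨h, hn⟩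
      | some b =>
        by_cases hmem : PySem.Set.contains st.2.2 (d.getD b "") = true
        · simp only [hmem, if_true]; exact ⟨h, hn⟩
        · rw [Bool.not_eq_true] at hmem
          have hnotmem : d.getD b "" ∉ st.2.2 := by
            simp only [PySem.Set.contains_eq_listContains] at hmem
            simpa using hmem
          have hnotmem' : d.getD b "" ∉ st.1 := h ▸ hnotmem
          simp only [hmem, Bool.false_eq_true, if_false]
          refine ⟨?_, ?_⟩
          · show st.1 ++ [d.getD b ""] = PySem.Set.add st.2.2 (d.getD b "")
            rw [PySem.Set.add_of_not_mem hnotmem, h]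
          · show (st.1 ++ [d.getD b ""]).Nodup
            rw [List.nodup_append]
            refine ⟨hn, List.nodup_cons.mpr ⟨List.not_mem_nil, List.nodup_nil⟩, ?_⟩
            intro a ha c hc heq
            rw [List.mem_singleton] at hc
            exact hnotmem' ((heq.trans hc) ▸ ha)
    exact ih _ hstep.1 hstep.2

-- ===== VERDICT (by name: the statement is the Claim_ definition above) =====
theorem find_matching_signatures_py_spec : Claim_equal_find_matching_signatures_py := by
  intro requested_symbols symbol_index _
  unfold Spec_find_matching_signatures_py
  simp only [find_matching_signatures_py, find_matching_signatures_py_alt, step_eq]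
  obtain ⟨hfs, hnd⟩ := pvB_inv (PySem.Dict.ofList symbol_index) requested_symbols
    ([], [], PySem.Set.empty) rfl List.nodup_nil
  have huniq : (requested_symbols.foldl (pvB_step (PySem.Dict.ofList symbol_index))
        ([], [], PySem.Set.empty)).1.foldl
        (fun u sig => if PySem.Set.contains u sig then u else u ++ [sig]) []
      = (requested_symbols.foldl (pvB_step (PySem.Dict.ofList symbol_index))
        ([], [], PySem.Set.empty)).1 := by
    have hadd : (fun (u : List String) sig =>
        if PySem.Set.contains u sig then u else u ++ [sig]) = PySem.Set.add := rfl
    rw [hadd, ← PySem.Set.ofList_eq_foldl]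
    exact PySem.Set.ofList_eq_self_of_nodup _ hnd
  rw [huniq]
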